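-- pv_equiv track=rewrite | github.com/ElsaZhang0917/scrapy | tutorial/utils.py | length_of_list
-- ===== SOURCE A (Python) =====
-- def length_of_list(nums):
-- 	"""
--
-- 	:param nums: a list of num
-- 	:return: length of max successive sub-list which are all less than 30
-- 	"""
-- 	len_nums = len(nums)
-- 	if len_nums == 0:
-- 		return 0
--
-- 	dp = [0 for i in range(len_nums)]
-- 	for i in range(len_nums):
-- 		if nums[i] <= 30:
-- 			dp[i] = 1
-- 			for num in nums[i + 1:]:
-- 				if num <= 30:
-- 					dp[i] = dp[i] + 1
-- 				else:
-- 					break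
-- 	return max(dp)
-- ===== SOURCE B (Python) =====
-- def length_of_list(nums):
--     best = 0
--     cur = 0
--     for n in nums:
--         if n <= 30:
--             cur += 1
--             if cur > best:
--                 best = cur
--         else:
--             cur = 0
--     return best
-- ===== Notes on version B (the rewrite author's own statement) =====
-- stated objective: faster
-- what changed: replaces the per-index rescan of the whole suffix (dp array + max) by a single pass that tracks the current run length and the best so far
import Mathlib
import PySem

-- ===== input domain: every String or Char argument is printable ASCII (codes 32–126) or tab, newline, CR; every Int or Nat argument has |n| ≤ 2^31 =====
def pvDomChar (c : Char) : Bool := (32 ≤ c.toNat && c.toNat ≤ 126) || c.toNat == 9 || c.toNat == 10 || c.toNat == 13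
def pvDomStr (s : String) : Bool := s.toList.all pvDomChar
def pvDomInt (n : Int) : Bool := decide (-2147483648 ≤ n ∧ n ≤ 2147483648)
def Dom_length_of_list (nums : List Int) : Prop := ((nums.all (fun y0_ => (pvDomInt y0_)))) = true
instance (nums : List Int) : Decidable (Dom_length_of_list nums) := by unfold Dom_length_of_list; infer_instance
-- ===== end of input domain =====

-- B replaces A's per-index rescan of the whole suffix (dp array + max) by one pass
-- tracking the current run length and the best so far (objective: faster).

-- ===== PORT A =====
-- inner 'for num in nums[i+1:]: if num <= 30: dp[i] += 1 else: break'
def pvInnerA : List Int → Int → Int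
  | [], acc => acc
  | n :: rest, acc => if n ≤ 30 then pvInnerA rest (acc + 1) else acc

def length_of_list (nums : List Int) : Int :=
  if nums.length = 0 then 0
  else
    -- dp[i] stays 0 unless nums[i] <= 30; nums[i] is in range for i ∈ range(len), so .getD 0 is never hit
    let dp := (List.range nums.length).map (fun (i : Nat) =>
      if (PySem.List.pyGet? nums ((i : Nat) : Int)).getD 0 ≤ 30 then
        pvInnerA (PySem.List.slice nums (some (((i : Nat) : Int) + 1)) none) 1
      else 0)
    -- Python max(dp); dp is nonempty here, so .getD 0 is never hit
    (PySem.List.max? dp (fun y => y)).getD 0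

-- ===== PORT B =====
def length_of_list_alt (nums : List Int) : Int :=
  (nums.foldl
    (fun (s : Int × Int) n =>
      if n ≤ 30 then
        (if s.2 + 1 > s.1 then s.2 + 1 else s.1, s.2 + 1)
      else (s.1, 0))
    (0, 0)).1

-- ===== PRECONDITION & SPEC =====
def Spec_length_of_list (nums : List Int) (out : Int) : Prop := out = length_of_list_alt nums
instance (nums : List Int) (out : Int) : Decidable (Spec_length_of_list nums out) := by unfold Spec_length_of_list; infer_instance

-- ===== CLAIM (what is proved, stated in full; the proofs are below) =====
def Claim_equal_length_of_list : Prop := ∀ (nums : List Int), Dom_length_of_list nums → Spec_length_of_list nums (length_of_list nums)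

-- ===== LEMMAS AND PROOFS =====

-- length of the leading run of elements ≤ 30
def leadRun : List Int → Int
  | [] => 0
  | n :: r => if n ≤ 30 then 1 + leadRun r else 0

-- max over all suffixes of their leading-run length = the answer
def Mrun : List Int → Int
  | [] => 0
  | n :: r => max (leadRun (n :: r)) (Mrun r)

theorem leadRun_nonneg (l : List Int) : 0 ≤ leadRun l := by
  induction l with
  | nil => simp [leadRun]
  | cons n r ih => simp only [leadRun]; split <;> omega

theorem leadRun_le_Mrun (l : List Int) : leadRun l ≤ Mrun l := by
  cases l with
  | nil => simp [leadRun, Mrun]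
  | cons n r => simp [Mrun]

theorem Mrun_nonneg (l : List Int) : 0 ≤ Mrun l := by
  induction l with
  | nil => simp [Mrun]
  | cons n r ih => simp only [Mrun]; omega

theorem pvInnerA_eq (l : List Int) : ∀ acc, pvInnerA l acc = acc + leadRun l := by
  induction l with
  | nil => intro acc; simp [pvInnerA, leadRun]
  | cons n r ih =>
    intro acc
    simp only [pvInnerA, leadRun]
    split <;> [rw [ih]; skip] <;> omega

theorem foldl_max_max (t : List Int) : ∀ a b, t.foldl max (max a b) = max a (t.foldl max b) := by
  induction t with
  | nil => intro a b; simp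
  | cons c t ih =>
    intro a b
    simp only [List.foldl_cons, max_assoc]
    exact ih a (max b c)

theorem A_eq_Mrun (nums : List Int) : length_of_list nums = Mrun nums := by
  induction nums with
  | nil => simp [length_of_list, Mrun]
  | cons n rest ih =>
    unfold length_of_list at *
    rw [if_neg (by simp)]
    simp only [List.length_cons]
    rw [List.range_succ_eq_map, List.map_cons, List.map_map]
    have hhead :
        (if (PySem.List.pyGet? (n :: rest) ((0 : Nat) : Int)).getD 0 ≤ 30 then
          pvInnerA (PySem.List.slice (n :: rest) (some (((0 : Nat) : Int) + 1)) none) 1 else 0)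
        = leadRun (n :: rest) := by
      have h1 : (((0 : Nat) : Int) + 1) = ((1 : Nat) : Int) := by norm_num
      rw [h1, PySem.List.slice_from_natCast]
      simp [leadRun, pvInnerA_eq]
    have htail :
        ((fun (i : Nat) =>
          if (PySem.List.pyGet? (n :: rest) ((i : Nat) : Int)).getD 0 ≤ 30 then
            pvInnerA (PySem.List.slice (n :: rest) (some (((i : Nat) : Int) + 1)) none) 1 else 0)
          ∘ Nat.succ)
        = (fun (i : Nat) =>
          if (PySem.List.pyGet? rest ((i : Nat) : Int)).getD 0 ≤ 30 then
            pvInnerA (PySem.List.slice rest (some (((i : Nat) : Int) + 1)) none) 1 else 0) := by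
      funext i
      have h1 : ((Nat.succ i : Nat) : Int) + 1 = (((i + 2 : Nat)) : Int) := by push_cast; ring
      have h2 : ((i : Nat) : Int) + 1 = (((i + 1 : Nat)) : Int) := by push_cast; ring
      simp only [Function.comp, h1, h2, PySem.List.slice_from_natCast, PySem.List.pyGet?_natCast]
      simp
    rw [htail, hhead, PySem.List.max?_id_cons, Option.getD_some]
    cases rest with
    | nil =>
      simp only [List.length_nil, List.range_zero, List.map_nil, List.foldl_nil, Mrun]
      have := leadRun_nonneg (n :: [])
      omega
    | cons m r =>
      -- the tail of dp is exactly the dp list of (m :: r); reuse ih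
      rw [if_neg (by simp)] at ih
      simp only [List.length_cons] at ih
      rw [List.range_succ_eq_map, List.map_cons, List.map_map] at ih
      rw [PySem.List.max?_id_cons, Option.getD_some] at ih
      simp only [List.length_cons]
      rw [List.range_succ_eq_map, List.map_cons, List.map_map, List.foldl_cons, foldl_max_max, ih]
      conv_rhs => rw [Mrun]

theorem B_fold (l : List Int) : ∀ best cur : Int, 0 ≤ cur → cur ≤ best →
    (l.foldl
      (fun (s : Int × Int) n =>
        if n ≤ 30 then
          (if s.2 + 1 > s.1 then s.2 + 1 else s.1, s.2 + 1)
        else (s.1, 0))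
      (best, cur)).1 = max best (max (cur + leadRun l) (Mrun l)) := by
  induction l with
  | nil => intro best cur h0 h1; simp [leadRun, Mrun]; omega
  | cons n r ih =>
    intro best cur h0 h1
    simp only [List.foldl_cons, leadRun, Mrun]
    have hlead := leadRun_nonneg r
    have hM := Mrun_nonneg r
    have hlm := leadRun_le_Mrun r
    by_cases hn : n ≤ 30
    · rw [if_pos hn, if_pos hn]
      rw [ih (if cur + 1 > best then cur + 1 else best) (cur + 1) (by omega) (by split <;> omega)]
      split <;> omega
    · rw [if_neg hn, if_neg hn]
      rw [ih best 0 (by omega) (by omega)]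
      omega

theorem B_eq_Mrun (nums : List Int) : length_of_list_alt nums = Mrun nums := by
  unfold length_of_list_alt
  rw [B_fold nums 0 0 le_rfl le_rfl]
  have := leadRun_le_Mrun nums
  have := Mrun_nonneg nums
  omega

-- ===== VERDICT (by name: the statement is the Claim_ definition above) =====
theorem length_of_list_spec : Claim_equal_length_of_list := by
  intro nums _
  unfold Spec_length_of_list
  rw [A_eq_Mrun, B_eq_Mrun]
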